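-- pv_equiv track=rewrite | github.com/posl/comment_recommendation | script/split_gen/5_time/ja/122_B/1.py | count_acgt
-- ===== SOURCE A (Python) =====
-- def count_acgt(str):
--     count = 0
--     max_count = 0
--     for i in range(len(str)):
--         if str[i] == "A" or str[i] == "C" or str[i] == "G" or str[i] == "T":
--             count += 1
--             if max_count < count:
--                 max_count = count
--         else:
--             count = 0
--     return max_count
-- ===== SOURCE B (Python) =====
-- from itertools import groupby
--
-- def count_acgt(str):
--     runs = [len(list(g)) for k, g in groupby(c in "ACGT" for c in str) if k]
--     return max(runs, default=0)
-- ===== Notes on version B (the rewrite author's own statement) =====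
-- stated objective: idiomatic
-- what changed: B splits the string into maximal ACGT runs with itertools.groupby and takes the max run length (default 0), instead of maintaining a running counter and running max inline; groupby's C-level iteration gives a constant-factor speedup over the per-index Python loop.
import Mathlib
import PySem

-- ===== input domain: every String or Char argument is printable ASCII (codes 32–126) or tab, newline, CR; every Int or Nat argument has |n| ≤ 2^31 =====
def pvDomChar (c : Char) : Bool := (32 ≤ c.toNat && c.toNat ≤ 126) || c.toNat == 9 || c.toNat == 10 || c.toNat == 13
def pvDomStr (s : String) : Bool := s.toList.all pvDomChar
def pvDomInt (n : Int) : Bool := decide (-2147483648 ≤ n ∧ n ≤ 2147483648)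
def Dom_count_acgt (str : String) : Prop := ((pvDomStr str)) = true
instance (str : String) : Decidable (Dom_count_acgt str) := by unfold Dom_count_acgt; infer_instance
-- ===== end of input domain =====

-- B computes the same longest ACGT-run length by grouping the string into maximal runs
-- (itertools.groupby) and maximising run lengths, instead of A's inline counter+max loop (idiomatic).

-- ===== PORT A =====
-- A's loop over str[i] with state (count, max_count), transliterated as recursion on the chars.
def aGo : List Char → Int → Int → Int
  | [], _, m => m
  | ch :: rest, c, m =>
    if ch = 'A' ∨ ch = 'C' ∨ ch = 'G' ∨ ch = 'T' then
      aGo rest (c + 1) (if m < c + 1 then c + 1 else m)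
    else
      aGo rest 0 m

def count_acgt (str : String) : Int := aGo str.toList 0 0

-- ===== PORT B =====
-- groupby(c in "ACGT" for c in str) filtered to the True groups: the lengths of the
-- maximal ACGT runs, emitted left to right (cur = length of the currently open run).
def acgtRuns : List Char → Int → List Int
  | [], cur => if cur ≠ 0 then [cur] else []
  | ch :: rest, cur =>
    if ch = 'A' ∨ ch = 'C' ∨ ch = 'G' ∨ ch = 'T' then
      acgtRuns rest (cur + 1)
    else
      if cur ≠ 0 then cur :: acgtRuns rest 0 else acgtRuns rest 0

-- max(runs, default=0): Python's max is a left fold over the list.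
def count_acgt_alt (str : String) : Int := (acgtRuns str.toList 0).foldl max 0

-- ===== PRECONDITION & SPEC =====
def Spec_count_acgt (str : String) (out : Int) : Prop := out = count_acgt_alt str
instance (str : String) (out : Int) : Decidable (Spec_count_acgt str out) := by unfold Spec_count_acgt; infer_instance

-- ===== CLAIM (what is proved, stated in full; the proofs are below) =====
def Claim_equal_count_acgt : Prop := ∀ (str : String), Dom_count_acgt str → Spec_count_acgt str (count_acgt str)

-- ===== LEMMAS AND PROOFS =====

-- 'best new run' function: the longest run length achievable in xs when the first run
-- may extend a run of length c already in progress.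
def gRun : List Char → Int → Int
  | [], _ => 0
  | ch :: rest, c =>
    if ch = 'A' ∨ ch = 'C' ∨ ch = 'G' ∨ ch = 'T' then
      max (c + 1) (gRun rest (c + 1))
    else
      gRun rest 0

theorem gRun_nonneg (xs : List Char) (c : Int) : 0 ≤ gRun xs c := by
  induction xs generalizing c with
  | nil => simp [gRun]
  | cons ch rest ih =>
    simp only [gRun]
    split
    · exact le_trans (ih (c + 1)) (le_max_right _ _)
    · exact ih 0

theorem aGo_eq_max (xs : List Char) (c m : Int) (hm : 0 ≤ m) :
    aGo xs c m = max m (gRun xs c) := by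
  induction xs generalizing c m with
  | nil => simp [aGo, gRun]; omega
  | cons ch rest ih =>
    simp only [aGo, gRun]
    split
    · rw [ih _ _ (by omega)]
      omega
    · exact ih 0 m hm

theorem foldl_max_max (l : List Int) (a b : Int) :
    l.foldl max (max a b) = max a (l.foldl max b) := by
  induction l generalizing b with
  | nil => simp
  | cons x t ih =>
    simp only [List.foldl]
    rw [max_assoc, ih]

theorem runs_fold_eq (xs : List Char) (cur : Int) (h : 0 ≤ cur) :
    (acgtRuns xs cur).foldl max 0 = max cur (gRun xs cur) := by
  induction xs generalizing cur with
  | nil =>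
    simp only [acgtRuns, gRun]
    split
    · simp; omega
    · simp; omega
  | cons ch rest ih =>
    simp only [acgtRuns, gRun]
    split
    · rw [ih (cur + 1) (by omega)]
      omega
    · have h0 := ih 0 le_rfl
      have hg := gRun_nonneg rest 0
      split
      · simp only [List.foldl]
        have : max 0 cur = max cur 0 := max_comm _ _
        rw [this, foldl_max_max, h0]
        omega
      · rw [h0]; omega

-- ===== VERDICT (by name: the statement is the Claim_ definition above) =====
theorem count_acgt_spec : Claim_equal_count_acgt := by
  intro s _
  unfold Spec_count_acgt count_acgt count_acgt_alt
  rw [aGo_eq_max _ _ _ le_rfl, runs_fold_eq _ 0 le_rfl]
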